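-- pv_equiv track=rewrite | github.com/GitGinocchio/GGsBot | old/test/AutoMod.py | remove_excessive_duplicates
-- ===== SOURCE A (Python) =====
-- def remove_excessive_duplicates(word):
--     max_consecutive = 2  # Imposta il numero massimo di caratteri consecutivi da mantenere
--     cleaned_word = ""
--     consecutive_count = 0
--
--     for char in word:
--         if cleaned_word == "" or char != cleaned_word[-1]:
--             consecutive_count = 1
--             cleaned_word += char
--         else:
--             consecutive_count += 1
--             if consecutive_count <= max_consecutive:
--                 cleaned_word += char
--
--     return cleaned_word
-- ===== SOURCE B (Python) =====
-- def remove_excessive_duplicates(word):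
--     out = []
--     i = 0
--     n = len(word)
--     while i < n:
--         j = i
--         while j < n and word[j] == word[i]:
--             j += 1
--         out.append(word[i] * min(j - i, 2))
--         i = j
--     return ''.join(out)
-- ===== Notes on version B (the rewrite author's own statement) =====
-- stated objective: alternative
-- what changed: B scans the string run by run with two pointers and emits min(runlen,2) copies of each run's character, instead of A's per-character loop with a counter and a lookback at the last emitted character.
import Mathlib
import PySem

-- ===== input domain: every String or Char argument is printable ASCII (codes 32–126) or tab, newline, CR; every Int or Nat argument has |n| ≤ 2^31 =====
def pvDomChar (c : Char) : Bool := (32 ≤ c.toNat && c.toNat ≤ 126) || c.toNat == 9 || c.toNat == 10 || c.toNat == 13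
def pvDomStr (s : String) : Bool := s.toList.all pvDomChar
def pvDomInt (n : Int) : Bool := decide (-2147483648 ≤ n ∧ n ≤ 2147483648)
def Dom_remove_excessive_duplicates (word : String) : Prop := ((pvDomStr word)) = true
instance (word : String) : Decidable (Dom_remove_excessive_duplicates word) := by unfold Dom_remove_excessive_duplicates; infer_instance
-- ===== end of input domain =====

-- B replaces A's per-character loop (counter + lookback at the last emitted char) by a
-- two-pointer run scan emitting min(runlen, 2) copies of each run's character (alternative decomposition).


-- ===== PORT A =====
-- state: (cleaned_word as List Char, consecutive_count); max_consecutive = 2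
def pvStepA (st : List Char × Int) (ch : Char) : List Char × Int :=
  match st.1.getLast? with
  | none => (st.1 ++ [ch], 1)              -- cleaned_word == ""
  | some last =>
    if ch ≠ last then (st.1 ++ [ch], 1)    -- char != cleaned_word[-1]
    else if st.2 + 1 ≤ 2 then (st.1 ++ [ch], st.2 + 1)
    else (st.1, st.2 + 1)

def remove_excessive_duplicates (word : String) : String :=
  String.mk (word.toList.foldl pvStepA ([], 0)).1

-- ===== PORT B =====
-- run-by-run scan: each chunk is one run capped at 2 characters; the chunks are joined at the end
def pvRunsB : List Char → List (List Char)
  | [] => []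
  | c :: rest =>
    List.replicate (min ((rest.takeWhile (· = c)).length + 1) 2) c
      :: pvRunsB (rest.dropWhile (· = c))
termination_by l => l.length
decreasing_by
  exact Nat.lt_succ_of_le (List.length_dropWhile_le _ _)

def remove_excessive_duplicates_alt (word : String) : String :=
  String.mk (pvRunsB word.toList).flatten

-- ===== PRECONDITION & SPEC =====
def Spec_remove_excessive_duplicates (word : String) (out : String) : Prop := out = remove_excessive_duplicates_alt word
instance (word : String) (out : String) : Decidable (Spec_remove_excessive_duplicates word out) := by unfold Spec_remove_excessive_duplicates; infer_instance

-- ===== CLAIM (what is proved, stated in full; the proofs are below) =====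
def Claim_equal_remove_excessive_duplicates : Prop := ∀ (word : String), Dom_remove_excessive_duplicates word → Spec_remove_excessive_duplicates word (remove_excessive_duplicates word)

-- ===== LEMMAS AND PROOFS =====
-- forward recursion computing exactly what A's fold appends after the already-emitted prefix
def pvG : Option Char → Int → List Char → List Char
  | _, _, [] => []
  | none, _, ch :: l => ch :: pvG (some ch) 1 l
  | some c, cnt, ch :: l =>
    if ch ≠ c then ch :: pvG (some ch) 1 l
    else if cnt + 1 ≤ 2 then ch :: pvG (some ch) (cnt + 1) l
    else pvG (some ch) (cnt + 1) l

theorem pvFoldA_eq_g (l : List Char) : ∀ (acc : List Char) (cnt : Int),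
    (l.foldl pvStepA (acc, cnt)).1 = acc ++ pvG acc.getLast? cnt l := by
  induction l with
  | nil => intro acc cnt; simp [pvG]
  | cons ch l ih =>
    intro acc cnt
    simp only [List.foldl_cons, pvStepA]
    cases h : acc.getLast? with
    | none =>
      have : acc = [] := List.getLast?_eq_none_iff.mp h
      subst this
      simp [pvG, ih]
    | some c =>
      simp only [pvG]
      by_cases hc : ch ≠ c
      · simp [hc, ih]
      · rw [not_not] at hc; subst hc
        by_cases h2 : cnt + 1 ≤ 2
        · simp [h2, ih]
        · simp [h2, ih, h]

theorem pvG_ge2 (l : List Char) : ∀ (c : Char) (cnt : Int), 2 ≤ cnt →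
    pvG (some c) cnt l = pvG none 0 (l.dropWhile (· = c)) := by
  induction l with
  | nil => intro c cnt _; simp [pvG]
  | cons ch l ih =>
    intro c cnt hcnt
    by_cases hc : ch = c
    · subst hc
      have h2 : ¬ (cnt + 1 ≤ 2) := by omega
      simp [pvG, h2, List.dropWhile, ih ch (cnt + 1) (by omega)]
    · simp [pvG, hc, List.dropWhile]

theorem pvG_one (l : List Char) (c : Char) :
    pvG (some c) 1 l =
      (if l.takeWhile (· = c) = [] then [] else [c]) ++ pvG none 0 (l.dropWhile (· = c)) := by
  cases l with
  | nil => simp [pvG]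
  | cons ch l =>
    by_cases hc : ch = c
    · subst hc
      simp [pvG, List.takeWhile, List.dropWhile, pvG_ge2 l ch 2 (by omega)]
    · simp [pvG, hc, List.takeWhile, List.dropWhile]

theorem pvG_eq_runs (l : List Char) : pvG none 0 l = (pvRunsB l).flatten := by
  induction l using pvRunsB.induct with
  | case1 => simp [pvG, pvRunsB]
  | case2 c rest ih =>
    rw [pvRunsB]
    simp only [pvG, List.flatten_cons]
    rw [pvG_one, ih]
    by_cases h : rest.takeWhile (· = c) = []
    · simp [h]
    · have : 1 ≤ (rest.takeWhile (· = c)).length := by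
        cases hh : rest.takeWhile (· = c) with
        | nil => exact absurd hh h
        | cons a t => simp
      have hmin : min ((rest.takeWhile (· = c)).length + 1) 2 = 2 := by omega
      simp [h, hmin, List.replicate]

-- ===== VERDICT (by name: the statement is the Claim_ definition above) =====
theorem remove_excessive_duplicates_spec : Claim_equal_remove_excessive_duplicates := by
  intro word _
  unfold Spec_remove_excessive_duplicates remove_excessive_duplicates remove_excessive_duplicates_alt
  rw [pvFoldA_eq_g]
  simp only [List.getLast?_nil, List.nil_append]
  rw [pvG_eq_runs]
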